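-- pv_equiv track=rewrite | github.com/NicoKNL/coding-problems | problems/kattis/rationalsequence3/sol.py | solve
-- ===== SOURCE A (Python) =====
-- def computeDepth(n):
--     depth = 1
--     nodes = 1
--
--     while nodes < n:
--         depth += 1
--         nodes = treeSize(depth)
--
--     return depth
--
-- def treeSize(n):
--     return pow(2, n) - 1
--
-- def nodesAtDepth(n):
--     return treeSize(n) - treeSize(n - 1)
--
-- def sequenceToRational(sequence):
--     left = 1
--     right = 1
--
--     for char in sequence:
--         if char == "L":
--             right = left + right
--         else:
--             left = left + right
--
--     return f"{left}/{right}"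
--
-- def solve(n):
--     depth = computeDepth(n)
--
--     sequence = ""
--     while depth > 1:
--         index = n - treeSize(depth - 1) - 1
--         if index < nodesAtDepth(depth) / 2:
--             sequence += "L"
--             n = n - nodesAtDepth(depth) // 2
--         else:
--             sequence += "R"
--             n = n - nodesAtDepth(depth)
--
--         depth -= 1
--
--     return sequenceToRational(sequence)
-- ===== SOURCE B (Python) =====
-- def solve(n):
--     # The L/R path to the n-th node is the binary expansion of n below its
--     # leading bit ('0' = L, '1' = R); no depth computation or tree walk needed.
--     left = 1
--     right = 1
--     if n >= 2:
--         for b in bin(n)[3:]: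
--             if b == '0':
--                 right = left + right
--             else:
--                 left = left + right
--     return f"{left}/{right}"
-- ===== Notes on version B (the rewrite author's own statement) =====
-- stated objective: simpler
-- what changed: B drops computeDepth/treeSize/nodesAtDepth and the top-down tree walk entirely: the L/R path is exactly the binary digits of n after its leading bit, so B runs the mediant fold directly over bin(n)[3:].
import Mathlib
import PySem

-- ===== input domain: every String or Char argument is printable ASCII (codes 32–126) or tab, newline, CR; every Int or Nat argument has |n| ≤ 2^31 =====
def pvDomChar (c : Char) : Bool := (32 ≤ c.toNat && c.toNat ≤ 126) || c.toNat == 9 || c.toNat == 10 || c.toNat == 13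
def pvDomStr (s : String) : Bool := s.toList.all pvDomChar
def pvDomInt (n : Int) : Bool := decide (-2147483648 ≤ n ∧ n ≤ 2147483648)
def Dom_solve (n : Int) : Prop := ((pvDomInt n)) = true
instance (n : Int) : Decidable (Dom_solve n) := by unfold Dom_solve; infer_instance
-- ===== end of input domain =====

-- B replaces A's depth search + top-down tree walk by a single mediant fold over the
-- binary digits of n after the leading 1 (objective: simpler).

-- ===== PORT A =====
-- pow(2, n) - 1; every call site of the Python passes n ≥ 0, where 2 ^ n.toNat is exact
def treeSizeA (n : Int) : Int := 2 ^ n.toNat - 1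

def nodesAtDepthA (n : Int) : Int := treeSizeA n - treeSizeA (n - 1)

-- 'while nodes < n: depth += 1; nodes = treeSize(depth)': nodes always equals
-- treeSize(depth) (initially nodes = 1 = treeSize(1)), so the guard reads
-- treeSize(depth); the fuel n.toNat + 2 never runs out (computeDepthGo_spec below:
-- the loop stops once treeSize(depth) ≥ n, after at most log2(n) + 1 iterations)
def computeDepthGo : Nat → Int → Int → Int
  | 0, _, depth => depth
  | fuel + 1, n, depth =>
      if treeSizeA depth < n then computeDepthGo fuel n (depth + 1) else depth

def computeDepthA (n : Int) : Int := computeDepthGo (n.toNat + 2) n 1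

def sequenceToRationalA (sequence : String) : String :=
  let lr := sequence.toList.foldl
    (fun (p : Int × Int) char => if char = 'L' then (p.1, p.1 + p.2) else (p.1 + p.2, p.2))
    (1, 1)
  PySem.Int.toStr lr.1 ++ "/" ++ PySem.Int.toStr lr.2

-- 'while depth > 1: … depth -= 1': depth decreases by exactly 1 each iteration, so
-- fuel depth.toNat never runs out
def solveGoA : Nat → Int → Int → String → String
  | 0, _, _, sequence => sequenceToRationalA sequence
  | fuel + 1, n, depth, sequence =>
      if depth > 1 then
        let index := n - treeSizeA (depth - 1) - 1
        -- Python compares 'index < nodesAtDepth(depth) / 2' (exact true division of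
        -- the even number nodesAtDepth(depth)); ported exactly as 2 * index < nodesAtDepth(depth)
        if 2 * index < nodesAtDepthA depth then
          solveGoA fuel (n - PySem.Int.floordiv (nodesAtDepthA depth) 2) (depth - 1) (sequence ++ "L")
        else
          solveGoA fuel (n - nodesAtDepthA depth) (depth - 1) (sequence ++ "R")
      else
        sequenceToRationalA sequence

def solve (n : Int) : String := solveGoA (computeDepthA n).toNat n (computeDepthA n) ""

-- ===== PORT B =====
-- bin(n)[3:]: the binary digits of n (n ≥ 2) below the leading 1 bit, most significant
-- first; the fuel n.toNat never runs out (n halves towards 1 each step)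
def binDigitsGoB : Nat → Int → List Char
  | 0, _ => []
  | fuel + 1, n =>
      if n < 2 then [] else binDigitsGoB fuel (n / 2) ++ [if n % 2 = 0 then '0' else '1']

def binDigitsB (n : Int) : List Char := binDigitsGoB n.toNat n

def solve_alt (n : Int) : String :=
  let bits := if 2 ≤ n then binDigitsB n else []
  let lr := bits.foldl
    (fun (p : Int × Int) b => if b = '0' then (p.1, p.1 + p.2) else (p.1 + p.2, p.2))
    (1, 1)
  PySem.Int.toStr lr.1 ++ "/" ++ PySem.Int.toStr lr.2

-- ===== PRECONDITION & SPEC =====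
def Spec_solve (n : Int) (out : String) : Prop := out = solve_alt n
instance (n : Int) (out : String) : Decidable (Spec_solve n out) := by unfold Spec_solve; infer_instance

-- ===== CLAIM (what is proved, stated in full; the proofs are below) =====
def Claim_equal_solve : Prop := ∀ (n : Int), Dom_solve n → Spec_solve n (solve n)

-- ===== LEMMAS AND PROOFS =====

-- ghost: the path bits of n (bits below the leading 1, MSB first; false = L, true = R)
def pvPath (n : Int) : List Bool :=
  if n < 2 then [] else pvPath (n / 2) ++ [decide (n % 2 = 1)]
termination_by n.toNat
decreasing_by omega

-- the common mediant step
def pvStep (p : Int × Int) (b : Bool) : Int × Int :=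
  if b then (p.1 + p.2, p.2) else (p.1, p.1 + p.2)

def pvRender (p : Int × Int) : String :=
  PySem.Int.toStr p.1 ++ "/" ++ PySem.Int.toStr p.2

def pvLR (b : Bool) : Char := if b then 'R' else 'L'

theorem pvPath_of_lt_two {n : Int} (h : n < 2) : pvPath n = [] := by
  unfold pvPath; simp [h]

theorem binDigitsGoB_eq : ∀ (f : Nat) (n : Int), n.toNat ≤ f →
    binDigitsGoB f n = (pvPath n).map (fun b => if b then '1' else '0') := by
  intro f
  induction f with
  | zero =>
      intro n hf
      rw [pvPath_of_lt_two (by omega)]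
      rfl
  | succ f ih =>
      intro n hf
      by_cases h : n < 2
      · rw [pvPath_of_lt_two h]
        simp [binDigitsGoB, h]
      · rw [binDigitsGoB, if_neg h]
        conv_rhs => rw [pvPath, if_neg h]
        rw [ih (n / 2) (by omega)]
        simp only [List.map_append, List.map_cons, List.map_nil]
        congr 1
        have h2 : n % 2 = 0 ∨ n % 2 = 1 := by omega
        rcases h2 with h2 | h2 <;> simp [h2]

theorem binDigitsB_eq (n : Int) :
    binDigitsB n = (pvPath n).map (fun b => if b then '1' else '0') :=
  binDigitsGoB_eq n.toNat n le_rfl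

-- B's fold over '0'/'1' characters is the pvStep fold over the bits
theorem pvFold01 : ∀ (bs : List Bool) (p : Int × Int),
    ((bs.map fun b => if b then '1' else '0').foldl
      (fun (p : Int × Int) b => if b = '0' then (p.1, p.1 + p.2) else (p.1 + p.2, p.2)) p)
    = bs.foldl pvStep p := by
  intro bs
  induction bs with
  | nil => intro p; rfl
  | cons b t ih => intro p; cases b <;> simp [List.foldl, pvStep, ih]

-- A's fold over 'L'/'R' characters is the pvStep fold over the bits
theorem pvFoldLR : ∀ (bs : List Bool) (p : Int × Int),
    ((bs.map pvLR).foldl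
      (fun (p : Int × Int) char => if char = 'L' then (p.1, p.1 + p.2) else (p.1 + p.2, p.2)) p)
    = bs.foldl pvStep p := by
  intro bs
  induction bs with
  | nil => intro p; rfl
  | cons b t ih => intro p; cases b <;> simp [List.foldl, pvLR, pvStep, ih]

theorem solve_alt_eq (n : Int) :
    solve_alt n = pvRender ((pvPath n).foldl pvStep (1, 1)) := by
  unfold solve_alt pvRender
  by_cases h : 2 ≤ n
  · simp only [if_pos h, binDigitsB_eq, pvFold01]
  · have h2 : n < 2 := by omega
    simp [if_neg h, pvPath_of_lt_two h2]

theorem pvPath_one : pvPath 1 = [] := pvPath_of_lt_two (by norm_num)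

theorem pvPath_two : pvPath 2 = [false] := by
  rw [pvPath]; norm_num [pvPath_one]

theorem pvPath_three : pvPath 3 = [true] := by
  rw [pvPath]; norm_num [pvPath_one]

-- removing the leading bit: for 2^k ≤ n < 2^(k+1) (k ≥ 1) the first path bit is the
-- bit below the top, and the rest is the path of n with that level stripped
theorem pvPath_msb : ∀ (k : Nat) (n : Int), 1 ≤ k → 2 ^ k ≤ n → n < 2 ^ (k + 1) →
    pvPath n = if n < 2 ^ k + 2 ^ (k - 1) then false :: pvPath (n - 2 ^ (k - 1))
               else true :: pvPath (n - 2 ^ k) := by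
  intro k
  induction k with
  | zero => intro n h; omega
  | succ k ih =>
    intro n _ hlo hhi
    simp only [Nat.add_sub_cancel]
    by_cases hk : k = 0
    · subst hk
      norm_num at hlo hhi ⊢
      have : n = 2 ∨ n = 3 := by omega
      rcases this with h | h <;> subst h
      · rw [if_pos (by norm_num), pvPath_two]; norm_num [pvPath_one]
      · rw [if_neg (by norm_num), pvPath_three]; norm_num [pvPath_one]
    · have hk1 : 1 ≤ k := by omega
      have hP : (0:Int) < 2 ^ (k - 1) := by positivity
      have e1 : (2:Int) ^ k = 2 * 2 ^ (k - 1) := by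
        conv_lhs => rw [show k = (k - 1) + 1 by omega]
        rw [pow_succ]; ring
      have e2 : (2:Int) ^ (k + 1) = 4 * 2 ^ (k - 1) := by rw [pow_succ, e1]; ring
      have e3 : (2:Int) ^ (k + 1 + 1) = 8 * 2 ^ (k - 1) := by rw [pow_succ, e2]; ring
      rw [e2] at hlo
      rw [e3] at hhi
      have hstep : pvPath n = pvPath (n / 2) ++ [decide (n % 2 = 1)] := by
        rw [pvPath, if_neg (by omega)]
      have ihh := ih (n / 2) hk1 (by rw [e1]; omega) (by rw [e2]; omega)
      rw [e1] at ihh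
      rw [e1, e2]
      by_cases hb : n < 6 * 2 ^ (k - 1)
      · rw [if_pos (by omega)]
        rw [if_pos (by omega)] at ihh
        have hlow : pvPath (n - 2 * 2 ^ (k - 1)) =
            pvPath (n / 2 - 2 ^ (k - 1)) ++ [decide (n % 2 = 1)] := by
          rw [pvPath, if_neg (by omega)]
          congr 2
          · omega
          · simp only [decide_eq_decide]; omega
        rw [hstep, ihh, hlow]; rfl
      · rw [if_neg (by omega)]
        rw [if_neg (by omega)] at ihh
        have hlow : pvPath (n - 4 * 2 ^ (k - 1)) =
            pvPath (n / 2 - 2 * 2 ^ (k - 1)) ++ [decide (n % 2 = 1)] := by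
          rw [pvPath, if_neg (by omega)]
          congr 2
          · omega
          · simp only [decide_eq_decide]; omega
        rw [hstep, ihh, hlow]; rfl

-- computeDepth loop invariant: with enough fuel the loop lands on the first depth
-- whose tree holds n
theorem computeDepthGo_spec : ∀ (f : Nat) (n d : Int), 1 ≤ d → treeSizeA (d - 1) < n →
    n ≤ treeSizeA (d - 1 + (f : Int)) →
    (1 ≤ computeDepthGo f n d ∧ treeSizeA (computeDepthGo f n d - 1) < n ∧
     n ≤ treeSizeA (computeDepthGo f n d)) := by
  intro f
  induction f with
  | zero =>
      intro n d h1 h2 h3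
      rw [show d - 1 + ((0:Nat):Int) = d - 1 by push_cast; ring] at h3
      omega
  | succ f ih =>
      intro n d h1 h2 h3
      rw [computeDepthGo]
      by_cases h : treeSizeA d < n
      · rw [if_pos h]
        refine ih n (d + 1) (by omega) (by rw [show d + 1 - 1 = d by ring]; exact h) ?_
        rw [show d + 1 - 1 + (f : Int) = d - 1 + ((f + 1 : Nat) : Int) by push_cast; ring]
        exact h3
      · rw [if_neg h]
        exact ⟨h1, h2, by omega⟩

theorem computeDepthA_le_one {n : Int} (h : n ≤ 1) : computeDepthA n = 1 := by
  unfold computeDepthA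
  rw [show n.toNat + 2 = (n.toNat + 1) + 1 from rfl, computeDepthGo, if_neg]
  rw [show treeSizeA 1 = 1 from by decide]
  omega

-- for n ≥ 2 the computed depth is k+1 with 2^k ≤ n < 2^(k+1), k ≥ 1
theorem computeDepthA_spec {n : Int} (h : 2 ≤ n) :
    ∃ k : Nat, 1 ≤ k ∧ computeDepthA n = (k : Int) + 1 ∧ 2 ^ k ≤ n ∧ n < 2 ^ (k + 1) := by
  have hp : (n.toNat : Int) < 2 ^ n.toNat := by exact_mod_cast Nat.lt_two_pow_self
  have e4 : (2:Int) ^ (n.toNat + 2) = 4 * 2 ^ n.toNat := by rw [pow_succ, pow_succ]; ring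
  have h0 : treeSizeA (1 - 1) < n := by rw [show treeSizeA (1 - 1) = 0 from by decide]; omega
  have hfuel : n ≤ treeSizeA (1 - 1 + ((n.toNat + 2 : Nat) : Int)) := by
    simp only [treeSizeA]
    rw [show ((1:Int) - 1 + ((n.toNat + 2 : Nat) : Int)).toNat = n.toNat + 2 by omega]
    omega
  obtain ⟨h1, h2, h3⟩ := computeDepthGo_spec (n.toNat + 2) n 1 (by omega) h0 hfuel
  rw [show computeDepthGo (n.toNat + 2) n 1 = computeDepthA n from rfl] at h1 h2 h3
  have hd2 : 2 ≤ computeDepthA n := by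
    by_contra hc
    have he : computeDepthA n = 1 := by omega
    rw [he, show treeSizeA 1 = 1 from by decide] at h3
    omega
  refine ⟨(computeDepthA n).toNat - 1, by omega, by omega, ?_, ?_⟩
  · have heq : (computeDepthA n - 1).toNat = (computeDepthA n).toNat - 1 := by omega
    simp only [treeSizeA, heq] at h2
    omega
  · have heq : (computeDepthA n).toNat - 1 + 1 = (computeDepthA n).toNat := by omega
    rw [heq]
    simp only [treeSizeA] at h3
    omega

-- the main loop of A produces exactly the path bits of n
theorem solveGoA_spec : ∀ (k : Nat) (n : Int) (s : String), 2 ^ k ≤ n → n < 2 ^ (k + 1) →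
    solveGoA (k + 1) n ((k : Int) + 1) s =
      pvRender ((s.toList ++ (pvPath n).map pvLR).foldl
        (fun (p : Int × Int) char => if char = 'L' then (p.1, p.1 + p.2) else (p.1 + p.2, p.2))
        (1, 1)) := by
  intro k
  induction k with
  | zero =>
      intro n s hlo hhi
      have hn : n = 1 := by norm_num at hlo hhi; omega
      rw [solveGoA, if_neg (by norm_num), hn, pvPath_of_lt_two (by omega)]
      simp [sequenceToRationalA, pvRender]
  | succ k ih =>
      intro n s hlo hhi
      push_cast
      have hP : (0:Int) < 2 ^ k := by positivity
      have hp1 : (2:Int) ^ (k + 1) = 2 * 2 ^ k := by rw [pow_succ]; ring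
      have hp2 : (2:Int) ^ (k + 1 + 1) = 4 * 2 ^ k := by rw [pow_succ, hp1]; ring
      rw [hp1] at hlo
      rw [hp2] at hhi
      rw [solveGoA, if_pos (by omega)]
      have htsz : treeSizeA (((k : Int) + 1 + 1) - 1) = 2 * 2 ^ k - 1 := by
        simp only [treeSizeA]
        rw [show (((k : Int) + 1 + 1) - 1).toNat = k + 1 by omega, hp1.symm]
      have hnad : nodesAtDepthA ((k : Int) + 1 + 1) = 2 * 2 ^ k := by
        simp only [nodesAtDepthA, treeSizeA]
        rw [show ((k : Int) + 1 + 1).toNat = k + 2 by omega,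
            show ((k : Int) + 1 + 1 - 1).toNat = k + 1 by omega]
        push_cast [pow_succ]
        ring
      simp only [htsz, hnad]
      have hfd : PySem.Int.floordiv (2 * 2 ^ k) 2 = 2 ^ k := by
        rw [PySem.Int.floordiv_eq_ediv_of_pos (by omega)]
        omega
      have hmsb := pvPath_msb (k + 1) n (by omega) (by rw [hp1]; omega) (by rw [hp2]; omega)
      simp only [Nat.add_sub_cancel] at hmsb
      rw [hp1] at hmsb
      have hstep : ((k : Int) + 1 + 1) - 1 = (k : Int) + 1 := by ring
      by_cases hb : 2 * (n - (2 * 2 ^ k - 1) - 1) < 2 * 2 ^ k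
      · rw [if_pos hb, hfd, hstep]
        rw [ih (n - 2 ^ k) (s ++ "L") (by omega) (by rw [hp1]; omega)]
        rw [hmsb, if_pos (by omega)]
        simp [pvLR]
      · rw [if_neg hb, hstep]
        rw [ih (n - 2 * 2 ^ k) (s ++ "R") (by omega) (by rw [hp1]; omega)]
        rw [hmsb, if_neg (by omega)]
        simp [pvLR]

theorem solve_eq (n : Int) : solve n = pvRender ((pvPath n).foldl pvStep (1, 1)) := by
  by_cases h : 2 ≤ n
  · obtain ⟨k, hk1, hdep, hlo, hhi⟩ := computeDepthA_spec h
    unfold solve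
    rw [hdep, show (((k : Nat) : Int) + 1).toNat = k + 1 by omega,
        solveGoA_spec k n "" hlo hhi]
    simp only [String.toList_empty, List.nil_append]
    rw [pvFoldLR]
  · unfold solve
    rw [computeDepthA_le_one (by omega)]
    rw [show ((1:Int)).toNat = 0 + 1 from rfl, solveGoA, if_neg (by norm_num),
        pvPath_of_lt_two (by omega)]
    rfl

-- ===== VERDICT (by name: the statement is the Claim_ definition above) =====
theorem solve_spec : Claim_equal_solve := by
  intro n _
  unfold Spec_solve
  rw [solve_eq, solve_alt_eq]
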